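-- pv_equiv track=rewrite | github.com/rbhatti-ai/health-canada-meddev-agent | src/core/traceability.py | get_valid_relationships_for_source
-- ===== SOURCE A (Python) =====
-- VALID_RELATIONSHIPS: dict[tuple[str, str], list[str]] = {
--     # Risk management chain
--     ("claim", "hazard"): ["addresses"],
--     ("claim", "evidence_item"): ["supported_by"],
--     ("hazard", "harm"): ["causes", "may_cause"],
--     ("hazard", "risk_control"): ["mitigated_by"],
--     ("risk_control", "verification_test"): ["verified_by"],
--     ("risk_control", "validation_test"): ["validated_by"],
--     ("verification_test", "evidence_item"): ["supported_by"],
--     ("validation_test", "evidence_item"): ["supported_by"],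
--     ("evidence_item", "artifact"): ["documented_in"],
--     # Design control chain (ISO 13485 7.3)
--     ("design_input", "design_output"): ["drives"],
--     ("design_output", "design_input"): ["satisfies"],
--     ("design_output", "design_verification"): ["verified_by"],
--     ("design_output", "design_validation"): ["validated_by"],
--     ("design_review", "design_output"): ["reviews"],
--     ("design_verification", "evidence_item"): ["supported_by"],
--     ("design_validation", "evidence_item"): ["supported_by"],
-- }
--
-- def get_valid_relationships_for_source(
--     source_type: str,
-- ) -> dict[str, list[str]]:
--     """Get all valid target types and relationships for a source type."""
--     result: dict[str, list[str]] = {}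
--     for (src, tgt), rels in VALID_RELATIONSHIPS.items():
--         if src == source_type:
--             result[tgt] = list(rels)
--     return result
-- ===== SOURCE B (Python) =====
-- # The same data, grouped by source type once and for all: one keyed lookup per call.
-- TARGETS_BY_SOURCE: dict[str, dict[str, list[str]]] = {
--     "claim": {"hazard": ["addresses"], "evidence_item": ["supported_by"]},
--     "hazard": {"harm": ["causes", "may_cause"], "risk_control": ["mitigated_by"]},
--     "risk_control": {"verification_test": ["verified_by"], "validation_test": ["validated_by"]},
--     "verification_test": {"evidence_item": ["supported_by"]},
--     "validation_test": {"evidence_item": ["supported_by"]},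
--     "evidence_item": {"artifact": ["documented_in"]},
--     "design_input": {"design_output": ["drives"]},
--     "design_output": {"design_input": ["satisfies"], "design_verification": ["verified_by"], "design_validation": ["validated_by"]},
--     "design_review": {"design_output": ["reviews"]},
--     "design_verification": {"evidence_item": ["supported_by"]},
--     "design_validation": {"evidence_item": ["supported_by"]},
-- }
--
--
-- def get_valid_relationships_for_source(
--     source_type: str,
-- ) -> dict[str, list[str]]:
--     """Get all valid target types and relationships for a source type."""
--     found = TARGETS_BY_SOURCE.get(source_type, {})
--     return {tgt: list(rels) for tgt, rels in found.items()}
-- ===== Notes on version B (the rewrite author's own statement) =====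
-- stated objective: faster
-- what changed: Replaces the per-call scan over all VALID_RELATIONSHIPS entries with a single keyed lookup in TARGETS_BY_SOURCE, the same data pre-grouped by source type, followed by a fresh-copy pass over just that group.
import Mathlib
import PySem

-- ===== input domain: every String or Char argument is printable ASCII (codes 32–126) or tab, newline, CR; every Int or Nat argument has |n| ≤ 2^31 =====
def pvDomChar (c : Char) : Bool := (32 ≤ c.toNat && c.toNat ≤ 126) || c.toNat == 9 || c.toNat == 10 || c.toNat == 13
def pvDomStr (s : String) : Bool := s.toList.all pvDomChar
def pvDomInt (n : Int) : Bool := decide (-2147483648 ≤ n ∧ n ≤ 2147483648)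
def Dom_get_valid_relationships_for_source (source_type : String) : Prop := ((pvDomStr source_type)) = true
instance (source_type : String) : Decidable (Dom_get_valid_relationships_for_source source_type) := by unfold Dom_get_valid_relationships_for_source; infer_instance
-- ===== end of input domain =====

-- B replaces A's per-call scan over all relationship entries with one keyed lookup in a table pre-grouped by source type (faster per call).

-- ===== PORT A =====
def pvVALID_RELATIONSHIPS : List ((String × String) × List String) :=
  [ (("claim", "hazard"), ["addresses"]),
    (("claim", "evidence_item"), ["supported_by"]),
    (("hazard", "harm"), ["causes", "may_cause"]),
    (("hazard", "risk_control"), ["mitigated_by"]),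
    (("risk_control", "verification_test"), ["verified_by"]),
    (("risk_control", "validation_test"), ["validated_by"]),
    (("verification_test", "evidence_item"), ["supported_by"]),
    (("validation_test", "evidence_item"), ["supported_by"]),
    (("evidence_item", "artifact"), ["documented_in"]),
    (("design_input", "design_output"), ["drives"]),
    (("design_output", "design_input"), ["satisfies"]),
    (("design_output", "design_verification"), ["verified_by"]),
    (("design_output", "design_validation"), ["validated_by"]),
    (("design_review", "design_output"), ["reviews"]),
    (("design_verification", "evidence_item"), ["supported_by"]),
    (("design_validation", "evidence_item"), ["supported_by"]) ]

def get_valid_relationships_for_source (source_type : String) : List (String × List String) :=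
  (pvVALID_RELATIONSHIPS.foldl
    (fun (result : PySem.Dict String (List String)) entry =>
      if entry.1.1 == source_type then result.insert entry.1.2 entry.2 else result)
    PySem.Dict.empty).items

-- ===== PORT B =====
-- module-level grouped table TARGETS_BY_SOURCE: source_type -> {target_type: relationships}
def pvTARGETS_BY_SOURCE : List (String × List (String × List String)) :=
  [ ("claim", [("hazard", ["addresses"]), ("evidence_item", ["supported_by"])]),
    ("hazard", [("harm", ["causes", "may_cause"]), ("risk_control", ["mitigated_by"])]),
    ("risk_control", [("verification_test", ["verified_by"]), ("validation_test", ["validated_by"])]),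
    ("verification_test", [("evidence_item", ["supported_by"])]),
    ("validation_test", [("evidence_item", ["supported_by"])]),
    ("evidence_item", [("artifact", ["documented_in"])]),
    ("design_input", [("design_output", ["drives"])]),
    ("design_output", [("design_input", ["satisfies"]), ("design_verification", ["verified_by"]), ("design_validation", ["validated_by"])]),
    ("design_review", [("design_output", ["reviews"])]),
    ("design_verification", [("evidence_item", ["supported_by"])]),
    ("design_validation", [("evidence_item", ["supported_by"])]) ]

def get_valid_relationships_for_source_alt (source_type : String) : List (String × List String) :=
  let found :=
    match pvTARGETS_BY_SOURCE.find? (fun p => p.1 == source_type) with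
    | some p => p.2
    | none => []
  found.map (fun q => (q.1, q.2))

-- ===== PRECONDITION & SPEC =====
def Spec_get_valid_relationships_for_source (source_type : String) (out : List (String × List String)) : Prop := out = get_valid_relationships_for_source_alt source_type
instance (source_type : String) (out : List (String × List String)) : Decidable (Spec_get_valid_relationships_for_source source_type out) := by unfold Spec_get_valid_relationships_for_source; infer_instance

-- ===== CLAIM (what is proved, stated in full; the proofs are below) =====
def Claim_equal_get_valid_relationships_for_source : Prop := ∀ (source_type : String), Dom_get_valid_relationships_for_source source_type → Spec_get_valid_relationships_for_source source_type (get_valid_relationships_for_source source_type)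

-- ===== LEMMAS AND PROOFS =====

-- ===== VERDICT (by name: the statement is the Claim_ definition above) =====
theorem get_valid_relationships_for_source_spec : Claim_equal_get_valid_relationships_for_source := by
  intro s _
  unfold Spec_get_valid_relationships_for_source
  by_cases h1 : s = "claim"; · subst h1; decide
  by_cases h2 : s = "hazard"; · subst h2; decide
  by_cases h3 : s = "risk_control"; · subst h3; decide
  by_cases h4 : s = "verification_test"; · subst h4; decide
  by_cases h5 : s = "validation_test"; · subst h5; decide
  by_cases h6 : s = "evidence_item"; · subst h6; decide
  by_cases h7 : s = "design_input"; · subst h7; decide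
  by_cases h8 : s = "design_output"; · subst h8; decide
  by_cases h9 : s = "design_review"; · subst h9; decide
  by_cases h10 : s = "design_verification"; · subst h10; decide
  by_cases h11 : s = "design_validation"; · subst h11; decide
  simp [get_valid_relationships_for_source, get_valid_relationships_for_source_alt,
    pvVALID_RELATIONSHIPS, pvTARGETS_BY_SOURCE, List.find?, PySem.Dict.empty,
    beq_iff_eq,
    beq_eq_false_iff_ne.mpr (Ne.symm h1), beq_eq_false_iff_ne.mpr (Ne.symm h2),
    beq_eq_false_iff_ne.mpr (Ne.symm h3), beq_eq_false_iff_ne.mpr (Ne.symm h4),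
    beq_eq_false_iff_ne.mpr (Ne.symm h5), beq_eq_false_iff_ne.mpr (Ne.symm h6),
    beq_eq_false_iff_ne.mpr (Ne.symm h7), beq_eq_false_iff_ne.mpr (Ne.symm h8),
    beq_eq_false_iff_ne.mpr (Ne.symm h9), beq_eq_false_iff_ne.mpr (Ne.symm h10),
    beq_eq_false_iff_ne.mpr (Ne.symm h11),
    Ne.symm h1, Ne.symm h2, Ne.symm h3, Ne.symm h4, Ne.symm h5, Ne.symm h6,
    Ne.symm h7, Ne.symm h8, Ne.symm h9, Ne.symm h10, Ne.symm h11]
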